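-- pv_equiv track=rewrite | github.com/xuxin2023/gas_calibrator | src/gas_calibrator/v2/core/multi_source_stability.py | _overall_status_from_evaluations
-- ===== SOURCE A (Python) =====
-- from typing import Any, Iterable
--
-- def _overall_status_from_evaluations(evaluations: list[dict[str, Any]]) -> str:
--     statuses = [str(item.get("status") or "") for item in evaluations]
--     if any(status == "degraded" for status in statuses):
--         return "degraded"
--     if any(status == "diagnostic_only" for status in statuses):
--         return "diagnostic_only"
--     if all(status == "passed" for status in statuses) and statuses:
--         return "passed"
--     return "diagnostic_only"
-- ===== SOURCE B (Python) =====
-- def _severity(item):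
--     status = str(item.get("status") or "")
--     if status == "degraded":
--         return 3
--     if status == "passed":
--         return 0
--     return 2
--
--
-- def _overall_status_from_evaluations(evaluations):
--     worst = max((_severity(item) for item in evaluations), default=2)
--     if worst == 3:
--         return "degraded"
--     if worst == 0:
--         return "passed"
--     return "diagnostic_only"
-- ===== Notes on version B (the rewrite author's own statement) =====
-- stated objective: alternative
-- what changed: Reformulated the if-ladder over any/any/all scans as a max-reduction over a numeric severity lattice (degraded=3, passed=0, anything else=2, empty defaults to 2) and decoded the single maximum back to a status.
import Mathlib
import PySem

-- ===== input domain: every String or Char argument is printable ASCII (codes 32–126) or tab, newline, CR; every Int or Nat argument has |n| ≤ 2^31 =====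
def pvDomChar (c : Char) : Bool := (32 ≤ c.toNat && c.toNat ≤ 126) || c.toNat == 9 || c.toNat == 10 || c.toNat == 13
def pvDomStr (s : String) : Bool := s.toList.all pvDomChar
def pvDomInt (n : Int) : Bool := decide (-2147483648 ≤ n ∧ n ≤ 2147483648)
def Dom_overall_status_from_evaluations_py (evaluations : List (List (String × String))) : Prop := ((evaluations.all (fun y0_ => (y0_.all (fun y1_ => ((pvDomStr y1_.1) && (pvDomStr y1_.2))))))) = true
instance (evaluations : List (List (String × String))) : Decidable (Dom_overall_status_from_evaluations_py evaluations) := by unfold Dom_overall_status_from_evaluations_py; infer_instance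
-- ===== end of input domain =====

-- B replaces A's any/any/all scans by a max-reduction over a numeric severity lattice decoded back to a status; objective: alternative formulation.
-- ===== PORT A =====
-- str(item.get("status") or ""): values are Strings, so `or ""` maps only a missing key (None) or "" to "" = getD "".
def pvStatusOf (item : List (String × String)) : String :=
  ((PySem.Dict.mk item).get? "status").getD ""

def overall_status_from_evaluations_py (evaluations : List (List (String × String))) : String :=
  let statuses := evaluations.map pvStatusOf
  if statuses.any (fun s => s == "degraded") then "degraded"
  else if statuses.any (fun s => s == "diagnostic_only") then "diagnostic_only"
  else if statuses.all (fun s => s == "passed") && !statuses.isEmpty then "passed"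
  else "diagnostic_only"

-- ===== PORT B =====
-- Source B's _severity helper
def pvSeverity (item : List (String × String)) : Nat :=
  let status := ((PySem.Dict.mk item).get? "status").getD ""
  if status == "degraded" then 3
  else if status == "passed" then 0
  else 2

-- max(generator, default=2): 2 on the empty list, else the fold of max over the severities
def overall_status_from_evaluations_py_alt (evaluations : List (List (String × String))) : String :=
  let worst := match evaluations.map pvSeverity with
    | [] => 2
    | x :: xs => xs.foldl max x
  if worst == 3 then "degraded"
  else if worst == 0 then "passed"
  else "diagnostic_only"

-- ===== PRECONDITION & SPEC =====
def Spec_overall_status_from_evaluations_py (evaluations : List (List (String × String))) (out : String) : Prop := out = overall_status_from_evaluations_py_alt evaluations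
instance (evaluations : List (List (String × String))) (out : String) : Decidable (Spec_overall_status_from_evaluations_py evaluations out) := by unfold Spec_overall_status_from_evaluations_py; infer_instance

-- ===== CLAIM (what is proved, stated in full; the proofs are below) =====
def Claim_equal_overall_status_from_evaluations_py : Prop := ∀ (evaluations : List (List (String × String))), Dom_overall_status_from_evaluations_py evaluations → Spec_overall_status_from_evaluations_py evaluations (overall_status_from_evaluations_py evaluations)

-- ===== LEMMAS AND PROOFS =====
theorem pvSeverity_cases (item : List (String × String)) :
    pvSeverity item = (if pvStatusOf item == "degraded" then 3
      else if pvStatusOf item == "passed" then 0 else 2) := by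
  simp [pvSeverity, pvStatusOf]

theorem fold_max_char (t : List (List (String × String))) :
    ∀ r : Nat, (r = 0 ∨ r = 2 ∨ r = 3) →
      (t.map pvSeverity).foldl max r =
        (if r = 3 ∨ (t.map pvStatusOf).any (fun s => s == "degraded") then 3
         else if r = 0 ∧ (t.map pvStatusOf).all (fun s => s == "passed") then 0
         else 2) := by
  induction t with
  | nil =>
    intro r hr
    rcases hr with h | h | h <;> simp [h]
  | cons a t ih =>
    intro r hr
    have hsev := pvSeverity_cases a
    simp only [List.map_cons, List.foldl_cons, List.any_cons, List.all_cons]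
    rw [ih (max r (pvSeverity a)) (by
      rcases hr with h | h | h <;>
        by_cases h1 : pvStatusOf a == "degraded" <;>
        by_cases h2 : pvStatusOf a == "passed" <;>
        simp [h, hsev, h1, h2])]
    by_cases h1 : pvStatusOf a = "degraded" <;>
      by_cases h2 : pvStatusOf a = "passed" <;>
      rcases hr with h | h | h <;>
      simp_all

theorem all_passed_excl (l : List String) (h : (l.all (fun s => s == "passed")) = true) :
    (l.any (fun s => s == "degraded")) = false ∧ (l.any (fun s => s == "diagnostic_only")) = false := by
  constructor <;>
    · simp only [List.any_eq_false, beq_iff_eq]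
      intro x hx
      have hp := List.all_eq_true.mp h x hx
      simp only [beq_iff_eq] at hp
      simp [hp]

-- ===== VERDICT (by name: the statement is the Claim_ definition above) =====
theorem overall_status_from_evaluations_py_spec : Claim_equal_overall_status_from_evaluations_py := by
  intro evaluations _
  unfold Spec_overall_status_from_evaluations_py overall_status_from_evaluations_py overall_status_from_evaluations_py_alt
  cases evaluations with
  | nil => simp
  | cons a t =>
    have hsev := pvSeverity_cases a
    simp only [List.map_cons]
    simp only [show (List.map pvSeverity t).foldl max (pvSeverity a) =
        (if pvSeverity a = 3 ∨ (t.map pvStatusOf).any (fun s => s == "degraded") then 3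
         else if pvSeverity a = 0 ∧ (t.map pvStatusOf).all (fun s => s == "passed") then 0
         else 2) from fold_max_char t (pvSeverity a) (by
      by_cases h1 : pvStatusOf a == "degraded" <;>
        by_cases h2 : pvStatusOf a == "passed" <;>
        simp [hsev, h1, h2])]
    cases hb6 : (t.map pvStatusOf).all (fun s => s == "passed") with
    | true =>
      obtain ⟨hb4, hb5⟩ := all_passed_excl _ hb6
      by_cases h1 : pvStatusOf a = "degraded" <;>
        by_cases h2 : pvStatusOf a = "diagnostic_only" <;>
        by_cases h3 : pvStatusOf a = "passed" <;>
        simp [List.any_cons, List.all_cons, h1, h2, h3, hsev, hb4, hb5, hb6]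
    | false =>
      cases hb4 : (t.map pvStatusOf).any (fun s => s == "degraded") <;>
        cases hb5 : (t.map pvStatusOf).any (fun s => s == "diagnostic_only") <;>
        by_cases h1 : pvStatusOf a = "degraded" <;>
        by_cases h2 : pvStatusOf a = "diagnostic_only" <;>
        by_cases h3 : pvStatusOf a = "passed" <;>
        simp [List.any_cons, List.all_cons, h1, h2, h3, hsev, hb4, hb5, hb6]
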